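-- pv_equiv track=rewrite | github.com/houcemZd/csif | app.py | bfs_cells
-- ===== SOURCE A (Python) =====
-- def lattice_neighbors(cell: tuple, rows: int, cols: int) -> list:
--     r, c = cell
--     nbrs = []
--     if c - 1 >= 0:
--         nbrs.append((r, c - 1))
--     if c + 1 < cols:
--         nbrs.append((r, c + 1))
--     for dr in [-1, 1]:
--         nr = r + dr
--         if 0 <= nr < rows:
--             nbrs.append((nr, c))
--             if r % 2 == 0 and c - 1 >= 0:
--                 nbrs.append((nr, c - 1))
--             elif r % 2 != 0 and c + 1 < cols:
--                 nbrs.append((nr, c + 1))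
--     return list(dict.fromkeys(nbrs))
--
-- def bfs_cells(center: tuple, rows: int, cols: int, k: int) -> list:
--     q = [center]
--     seen = {center}
--     out = []
--     while q and len(out) < k:
--         cur = q.pop(0)
--         out.append(cur)
--         for nb in lattice_neighbors(cur, rows, cols):
--             if nb not in seen:
--                 seen.add(nb)
--                 q.append(nb)
--     return out
-- ===== SOURCE B (Python) =====
-- def lattice_neighbors(cell: tuple, rows: int, cols: int) -> list:
--     r, c = cell
--     nbrs = []
--     if c - 1 >= 0:
--         nbrs.append((r, c - 1))
--     if c + 1 < cols:
--         nbrs.append((r, c + 1))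
--     for dr in [-1, 1]:
--         nr = r + dr
--         if 0 <= nr < rows:
--             nbrs.append((nr, c))
--             if r % 2 == 0 and c - 1 >= 0:
--                 nbrs.append((nr, c - 1))
--             elif r % 2 != 0 and c + 1 < cols:
--                 nbrs.append((nr, c + 1))
--     return list(dict.fromkeys(nbrs))
--
-- def bfs_cells(center: tuple, rows: int, cols: int, k: int) -> list:
--     # level-synchronous BFS: process the lattice layer by layer instead of a FIFO queue
--     frontier = [center]
--     seen = {center}
--     out = []
--     while frontier and len(out) < k:
--         next_frontier = []
--         for node in frontier:
--             if len(out) >= k: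
--                 break
--             out.append(node)
--             for nb in lattice_neighbors(node, rows, cols):
--                 if nb not in seen:
--                     seen.add(nb)
--                     next_frontier.append(nb)
--         frontier = next_frontier
--     return out
-- ===== Notes on version B (the rewrite author's own statement) =====
-- stated objective: alternative
-- what changed: Replaced A's single FIFO queue (pop front, append unseen neighbors to the back) with a level-synchronous BFS: a nested loop that walks the current layer, breaking mid-layer at k, while collecting unseen neighbors into an explicit next_frontier that becomes the next layer.
import Mathlib
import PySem

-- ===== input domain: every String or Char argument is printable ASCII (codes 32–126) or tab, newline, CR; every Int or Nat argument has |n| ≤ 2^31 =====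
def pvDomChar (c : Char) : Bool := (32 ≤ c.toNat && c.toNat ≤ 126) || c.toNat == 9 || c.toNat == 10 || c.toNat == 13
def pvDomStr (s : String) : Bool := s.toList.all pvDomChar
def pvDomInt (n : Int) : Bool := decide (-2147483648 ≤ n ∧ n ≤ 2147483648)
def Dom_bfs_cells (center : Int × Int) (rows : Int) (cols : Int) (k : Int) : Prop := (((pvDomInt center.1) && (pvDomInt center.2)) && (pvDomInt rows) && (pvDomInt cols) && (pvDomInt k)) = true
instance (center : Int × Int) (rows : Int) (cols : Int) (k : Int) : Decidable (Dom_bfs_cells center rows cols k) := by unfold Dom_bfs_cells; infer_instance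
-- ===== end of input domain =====

-- B replaces A's single FIFO queue by a level-synchronous BFS (nested per-layer loop with an
-- explicit next_frontier accumulator); objective: alternative decomposition, same cost.

-- ===== PORT A =====
-- shared helper (identical in both Pythons)
def lattice_neighbors (cell : Int × Int) (rows : Int) (cols : Int) : List (Int × Int) :=
  let r := cell.1
  let c := cell.2
  let nbrs : List (Int × Int) :=
    (if c - 1 ≥ 0 then [(r, c - 1)] else []) ++
    (if c + 1 < cols then [(r, c + 1)] else []) ++
    ([(-1 : Int), 1].foldl (fun acc dr =>
        let nr := r + dr
        if 0 ≤ nr ∧ nr < rows then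
          acc ++ [(nr, c)] ++
            (if PySem.Int.mod r 2 = 0 ∧ c - 1 ≥ 0 then [(nr, c - 1)]
             else if PySem.Int.mod r 2 ≠ 0 ∧ c + 1 < cols then [(nr, c + 1)]
             else [])
        else acc) [])
  PySem.List.dedup nbrs

-- A's while loop: pop from the front of a single FIFO queue, append unseen neighbors to its end
def bfsLoopA (rows : Int) (cols : Int) (k : Int) (q : List (Int × Int))
    (seen : PySem.Set (Int × Int)) (out : List (Int × Int)) : List (Int × Int) :=
  match q with
  | [] => out
  | cur :: rest =>
    if _h : (out.length : Int) < k then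
      let st := (lattice_neighbors cur rows cols).foldl
        (fun (st : List (Int × Int) × PySem.Set (Int × Int)) nb =>
          if PySem.Set.contains st.2 nb then st else (st.1 ++ [nb], PySem.Set.add st.2 nb))
        (rest, seen)
      bfsLoopA rows cols k st.1 st.2 (out ++ [cur])
    else out
  termination_by (k - out.length).toNat
  decreasing_by simp; omega

def bfs_cells (center : Int × Int) (rows : Int) (cols : Int) (k : Int) : List (Int × Int) :=
  bfsLoopA rows cols k [center] (PySem.Set.ofList [center]) []

-- ===== PORT B =====
-- inner per-layer loop of B: walk the current frontier, appending to out (breaking at k) and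
-- collecting unseen neighbors into the next frontier
def bfsInnerB (rows : Int) (cols : Int) (k : Int) (frontier : List (Int × Int))
    (seen : PySem.Set (Int × Int)) (out : List (Int × Int)) (nf : List (Int × Int)) :
    List (Int × Int) × PySem.Set (Int × Int) × List (Int × Int) :=
  match frontier with
  | [] => (out, seen, nf)
  | node :: rest =>
    if (out.length : Int) ≥ k then (out, seen, nf)
    else
      let st := (lattice_neighbors node rows cols).foldl
        (fun (st : PySem.Set (Int × Int) × List (Int × Int)) nb =>
          if PySem.Set.contains st.1 nb then st else (PySem.Set.add st.1 nb, st.2 ++ [nb]))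
        (seen, nf)
      bfsInnerB rows cols k rest st.1 (out ++ [node]) st.2

-- inner loop never shortens out (used for outer-loop termination)
theorem bfsInnerB_out_le (rows cols k : Int) (frontier : List (Int × Int))
    (seen : PySem.Set (Int × Int)) (out nf : List (Int × Int)) :
    out.length ≤ (bfsInnerB rows cols k frontier seen out nf).1.length := by
  induction frontier generalizing seen out nf with
  | nil => simp [bfsInnerB]
  | cons x xs ih =>
    simp only [bfsInnerB]
    split
    · simp
    · exact le_trans (by simp) (ih _ _ _)

-- outer while loop of B
def bfsLoopB (rows : Int) (cols : Int) (k : Int) (frontier : List (Int × Int))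
    (seen : PySem.Set (Int × Int)) (out : List (Int × Int)) : List (Int × Int) :=
  if _h : frontier = [] ∨ ¬ ((out.length : Int) < k) then out
  else
    let st := bfsInnerB rows cols k frontier seen out []
    bfsLoopB rows cols k st.2.2 st.2.1 st.1
  termination_by (k - out.length).toNat
  decreasing_by
    push Not at _h
    obtain ⟨hne, hk⟩ := _h
    obtain ⟨x, xs, rfl⟩ := List.exists_cons_of_ne_nil hne
    have h1 : (out ++ [x]).length ≤ (bfsInnerB rows cols k (x :: xs) seen out []).1.length := by
      simp only [bfsInnerB]
      split
      · omega
      · exact bfsInnerB_out_le _ _ _ _ _ _ _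
    simp at h1 ⊢
    omega

def bfs_cells_alt (center : Int × Int) (rows : Int) (cols : Int) (k : Int) : List (Int × Int) :=
  bfsLoopB rows cols k [center] (PySem.Set.ofList [center]) []

-- ===== PRECONDITION & SPEC =====
def Spec_bfs_cells (center : Int × Int) (rows : Int) (cols : Int) (k : Int) (out : List (Int × Int)) : Prop := out = bfs_cells_alt center rows cols k
instance (center : Int × Int) (rows : Int) (cols : Int) (k : Int) (out : List (Int × Int)) : Decidable (Spec_bfs_cells center rows cols k out) := by unfold Spec_bfs_cells; infer_instance

-- ===== CLAIM (what is proved, stated in full; the proofs are below) =====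
def Claim_equal_bfs_cells : Prop := ∀ (center : Int × Int) (rows : Int) (cols : Int) (k : Int), Dom_bfs_cells center rows cols k → Spec_bfs_cells center rows cols k (bfs_cells center rows cols k)

-- ===== LEMMAS AND PROOFS =====

-- the neighbor fold only appends to the queue, and what it appends depends only on seen
theorem foldl_queue_shift (L : List (Int × Int)) (q q' : List (Int × Int))
    (seen : PySem.Set (Int × Int)) :
    L.foldl (fun (st : List (Int × Int) × PySem.Set (Int × Int)) nb =>
        if PySem.Set.contains st.2 nb then st else (st.1 ++ [nb], PySem.Set.add st.2 nb))
      (q ++ q', seen)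
    = (q ++ (L.foldl (fun st nb =>
        if PySem.Set.contains st.2 nb then st else (st.1 ++ [nb], PySem.Set.add st.2 nb))
      (q', seen)).1,
       (L.foldl (fun st nb =>
        if PySem.Set.contains st.2 nb then st else (st.1 ++ [nb], PySem.Set.add st.2 nb))
      (q', seen)).2) := by
  induction L generalizing q' seen with
  | nil => simp
  | cons x xs ih =>
    simp only [List.foldl_cons]
    split_ifs with hx
    · exact ih q' seen
    · rw [List.append_assoc]
      exact ih (q' ++ [x]) (PySem.Set.add seen x)

-- A's fold (queue first) and B's fold (next-frontier second) compute the same pair, swapped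
theorem foldl_AB (L : List (Int × Int)) (q : List (Int × Int)) (seen : PySem.Set (Int × Int)) :
    L.foldl (fun (st : List (Int × Int) × PySem.Set (Int × Int)) nb =>
        if PySem.Set.contains st.2 nb then st else (st.1 ++ [nb], PySem.Set.add st.2 nb))
      (q, seen)
    = ((L.foldl (fun (st : PySem.Set (Int × Int) × List (Int × Int)) nb =>
          if PySem.Set.contains st.1 nb then st else (PySem.Set.add st.1 nb, st.2 ++ [nb]))
        (seen, q)).2,
       (L.foldl (fun (st : PySem.Set (Int × Int) × List (Int × Int)) nb =>
          if PySem.Set.contains st.1 nb then st else (PySem.Set.add st.1 nb, st.2 ++ [nb]))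
        (seen, q)).1) := by
  induction L generalizing q seen with
  | nil => simp
  | cons x xs ih =>
    simp only [List.foldl_cons]
    split_ifs with hx
    · exact ih q seen
    · exact ih (q ++ [x]) (PySem.Set.add seen x)

-- key lemma: running A's queue F ++ N equals running B's inner loop over layer F with
-- accumulator N, then continuing A on the produced next frontier
theorem loopA_split (rows cols k : Int) (F N : List (Int × Int))
    (seen : PySem.Set (Int × Int)) (out : List (Int × Int)) :
    bfsLoopA rows cols k (F ++ N) seen out
    = (fun st => bfsLoopA rows cols k st.2.2 st.2.1 st.1)
        (bfsInnerB rows cols k F seen out N) := by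
  induction F generalizing N seen out with
  | nil => simp [bfsInnerB]
  | cons x xs ih =>
    simp only [bfsInnerB, List.cons_append]
    by_cases hk : (out.length : Int) < k
    · rw [bfsLoopA]
      simp only [hk, dif_pos]
      have hge : ¬ ((out.length : Int) ≥ k) := by omega
      simp only [hge, if_false]
      rw [foldl_queue_shift, foldl_AB]
      exact ih _ _ _
    · have hge : (out.length : Int) ≥ k := by omega
      simp only [hge, if_true]
      rw [bfsLoopA]
      simp only [hk, dif_neg, not_false_iff]
      -- RHS: bfsLoopA on (N, seen, out) with ¬ out < k returns out
      cases N with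
      | nil => rw [bfsLoopA]
      | cons y ys => rw [bfsLoopA]; simp [hk]

-- A's loop equals B's outer loop, by strong induction on the remaining budget
theorem loopA_eq_loopB (rows cols k : Int) (q : List (Int × Int))
    (seen : PySem.Set (Int × Int)) (out : List (Int × Int)) :
    bfsLoopA rows cols k q seen out = bfsLoopB rows cols k q seen out := by
  generalize hm : (k - out.length).toNat = m
  induction m using Nat.strong_induction_on generalizing q seen out with
  | _ m ih =>
    subst hm
    rw [bfsLoopB]
    by_cases hstop : q = [] ∨ ¬ ((out.length : Int) < k)
    · simp only [hstop, dif_pos]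
      rcases hstop with rfl | hk
      · rw [bfsLoopA]
      · cases q with
        | nil => rw [bfsLoopA]
        | cons x xs => rw [bfsLoopA]; simp [hk]
    · simp only [hstop, dif_neg, not_false_iff]
      push Not at hstop
      obtain ⟨hne, hk⟩ := hstop
      have := loopA_split rows cols k q [] seen out
      rw [List.append_nil] at this
      rw [this]
      obtain ⟨x, xs, rfl⟩ := List.exists_cons_of_ne_nil hne
      set st := bfsInnerB rows cols k (x :: xs) seen out [] with hst
      have h1 : (out ++ [x]).length ≤ st.1.length := by
        rw [hst]
        simp only [bfsInnerB]
        split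
        · omega
        · exact bfsInnerB_out_le _ _ _ _ _ _ _
      simp only []
      refine ih _ ?_ _ _ _ rfl
      simp at h1
      omega

-- ===== VERDICT (by name: the statement is the Claim_ definition above) =====
theorem bfs_cells_spec : Claim_equal_bfs_cells := by
  intro center rows cols k _
  unfold Spec_bfs_cells bfs_cells bfs_cells_alt
  exact loopA_eq_loopB rows cols k [center] (PySem.Set.ofList [center]) []
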